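-- pv_equiv track=rewrite | github.com/Marker-bit/efikator | utils.py | _cut_context
-- ===== SOURCE A (Python) =====
-- def get_char(line, ind):
--     if ind < 0 or ind >= len(line):
--         return "_"
--     return line[ind]
--
-- def _cut_context(s: int, line: str, pos: int):
--     line = line.replace("\n", "")
--     # line = f"*{line}*"
--     # ind = pos + 1
--     ind = pos
--     r = ""
--     for i in range(s):
--         r += get_char(line, ind - (s - i))
--     for i in range(1, s + 1):
--         r += get_char(line, ind + i)
--     return r
-- ===== SOURCE B (Python) =====
-- def _cut_context(s: int, line: str, pos: int):
--     line = line.replace("\n", "")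
--     n = len(line)
--
--     def seg(a, b):
--         if b <= a:
--             return ""
--         pad_l = max(0, min(b, 0) - a)
--         pad_r = max(0, b - max(a, n))
--         return "_" * pad_l + line[max(0, a):max(0, min(b, n))] + "_" * pad_r
--
--     return seg(pos - s, pos) + seg(pos + 1, pos + s + 1)
-- ===== Notes on version B (the rewrite author's own statement) =====
-- stated objective: faster
-- what changed: Replaces the loop of 2s per-character bound-checked get_char calls and string concatenations by two clamped slices of the line plus arithmetically computed '_'-padding, concatenated once.
import Mathlib
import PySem

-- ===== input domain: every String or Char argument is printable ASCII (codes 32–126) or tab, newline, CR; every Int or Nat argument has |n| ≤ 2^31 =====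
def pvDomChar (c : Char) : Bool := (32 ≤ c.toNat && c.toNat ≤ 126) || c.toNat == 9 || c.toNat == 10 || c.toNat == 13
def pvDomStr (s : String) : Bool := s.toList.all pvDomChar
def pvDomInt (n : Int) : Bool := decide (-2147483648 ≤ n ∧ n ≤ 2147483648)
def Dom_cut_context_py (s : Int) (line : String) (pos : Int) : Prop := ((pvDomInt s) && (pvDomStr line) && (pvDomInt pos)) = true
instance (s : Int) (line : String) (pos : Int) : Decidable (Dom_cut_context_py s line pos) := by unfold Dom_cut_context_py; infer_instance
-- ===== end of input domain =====

-- B replaces A's per-character loop of 2s bound-checked get_char calls by two clamped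
-- slices plus '_'-padding computed arithmetically (objective: faster by a constant factor).

-- ===== PORT A =====
-- get_char: '_' out of range, else line[ind] (the pyGetD default is unreachable under the guard)
def get_char (line : List Char) (ind : Int) : Char :=
  if ind < 0 ∨ ind ≥ (line.length : Int) then '_'
  else PySem.List.pyGetD line ind '_'

def cut_context_py (s : Int) (line : String) (pos : Int) : String :=
  let l := (PySem.Str.replace line "\n" "").toList
  let ind := pos
  let r : List Char := (PySem.List.pyRange 0 s 1).foldl
      (fun r i => r ++ [get_char l (ind - (s - i))]) []
  let r := (PySem.List.pyRange 1 (s + 1) 1).foldl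
      (fun r i => r ++ [get_char l (ind + i)]) r
  String.ofList r

-- ===== PORT B =====
-- one padded clamped slice: the characters of positions a..b-1, '_' outside the line
def segB (line : List Char) (a b : Int) : List Char :=
  if b ≤ a then []
  else
    let n : Int := line.length
    let padl := (max 0 (min b 0 - a)).toNat
    let padr := (max 0 (b - max a n)).toNat
    List.replicate padl '_'
      ++ PySem.List.slice line (some (max 0 a)) (some (max 0 (min b n)))
      ++ List.replicate padr '_'

def cut_context_py_alt (s : Int) (line : String) (pos : Int) : String :=
  let l := (PySem.Str.replace line "\n" "").toList
  String.ofList (segB l (pos - s) pos ++ segB l (pos + 1) (pos + s + 1))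

-- ===== PRECONDITION & SPEC =====
def Spec_cut_context_py (s : Int) (line : String) (pos : Int) (out : String) : Prop := out = cut_context_py_alt s line pos
instance (s : Int) (line : String) (pos : Int) (out : String) : Decidable (Spec_cut_context_py s line pos out) := by unfold Spec_cut_context_py; infer_instance

-- ===== CLAIM (what is proved, stated in full; the proofs are below) =====
def Claim_equal_cut_context_py : Prop := ∀ (s : Int) (line : String) (pos : Int), Dom_cut_context_py s line pos → Spec_cut_context_py s line pos (cut_context_py s line pos)

-- ===== LEMMAS AND PROOFS =====

-- mapping a constantly-'_' function over a range is replicate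
theorem map_const_underscore (l : List Char) (a b : Int)
    (h : ∀ i : Int, a ≤ i → i < b → get_char l i = '_') :
    (PySem.List.pyRange a b 1).map (get_char l) = List.replicate (b - a).toNat '_' := by
  have h1 : (PySem.List.pyRange a b 1).map (get_char l)
      = (PySem.List.pyRange a b 1).map (fun _ => '_') := by
    apply List.map_congr_left
    intro i hi
    rcases (PySem.List.mem_pyRange_one).1 hi with ⟨h1, h2⟩
    exact h i h1 h2
  rw [h1, List.map_const', PySem.List.length_pyRange_one]

-- the in-range middle: mapping get_char over [a, a+k) inside the line is drop/take
theorem map_get_char_in_range (l : List Char) (a k : Nat) (h : a + k ≤ l.length) :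
    (PySem.List.pyRange (a : Int) ((a : Int) + (k : Int)) 1).map (get_char l)
      = (l.drop a).take k := by
  induction k with
  | zero => simp [PySem.List.pyRange_one_eq_nil]
  | succ k ih =>
    have hk : a + k ≤ l.length := by omega
    have hle : (a : Int) ≤ (a : Int) + (k : Int) := by omega
    have : ((a : Int) + ((k : Nat) + 1 : Nat)) = ((a : Int) + (k : Int)) + 1 := by push_cast; ring
    rw [this, PySem.List.pyRange_one_succ_right hle, List.map_append, ih hk]
    have hlt : a + k < l.length := by omega
    have hg : get_char l ((a : Int) + (k : Int)) = l[a + k] := by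
      have h0 : ¬ ((a : Int) + (k : Int) < 0 ∨ (a : Int) + (k : Int) ≥ (l.length : Int)) := by
        omega
      simp only [get_char, h0, if_false]
      rw [show ((a : Int) + (k : Int)) = ((a + k : Nat) : Int) by push_cast; ring]
      rw [PySem.List.pyGetD_natCast]
      exact List.getD_eq_getElem l '_' hlt
    have hdrop : k < (l.drop a).length := by simp; omega
    rw [List.take_add_one]
    simp only [List.map_cons, List.map_nil, hg]
    congr 1
    rw [List.getElem?_eq_getElem hdrop]
    simp [List.getElem_drop]

-- the key lemma: B's padded clamped slice is the map of A's get_char over the index range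
theorem segB_eq_map (l : List Char) (a b : Int) :
    segB l a b = (PySem.List.pyRange a b 1).map (get_char l) := by
  by_cases hba : b ≤ a
  · simp [segB, hba, PySem.List.pyRange_one_eq_nil hba]
  · rw [not_le] at hba
    have hn : (0 : Int) ≤ (l.length : Int) := by positivity
    set n : Int := (l.length : Int) with hndef
    set m1 : Int := max a (min b 0) with hm1
    set m2 : Int := max a (min b n) with hm2
    have h1 : a ≤ m1 := le_max_left _ _
    have h12 : m1 ≤ m2 := by
      apply max_le_max_left
      exact min_le_min_left _ hn
    have h2 : m2 ≤ b := by
      apply max_le (le_of_lt hba) (min_le_left _ _)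
    rw [PySem.List.pyRange_one_append a m1 b h1 (le_trans h12 h2),
        PySem.List.pyRange_one_append m1 m2 b h12 h2,
        List.map_append, List.map_append]
    have hpart1 : (PySem.List.pyRange a m1 1).map (get_char l)
        = List.replicate (m1 - a).toNat '_' := by
      apply map_const_underscore
      intro i hai hib
      have hi0 : i < 0 := by
        rcases le_or_gt (min b 0) a with hc | hc
        · omega
        · have : m1 = min b 0 := by omega
          omega
      simp [get_char, hi0]
    have hpart3 : (PySem.List.pyRange m2 b 1).map (get_char l)
        = List.replicate (b - m2).toNat '_' := by
      apply map_const_underscore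
      intro i hai hib
      have hin : i ≥ n := by
        rcases le_or_gt b n with hc | hc
        · have : m2 = b := by omega
          omega
        · have : min b n = n := by omega
          omega
      unfold get_char
      rw [if_pos (Or.inr (by omega : i ≥ (l.length : Int)))]
    have hpart2 : (PySem.List.pyRange m1 m2 1).map (get_char l)
        = PySem.List.slice l (some (max 0 a)) (some (max 0 (min b n))) := by
      rcases le_or_gt b 0 with hb0 | hb0
      · -- everything left of the line: middle empty on both sides
        have hmm : m2 ≤ m1 := by
          have : min b n = b := by omega
          have : min b 0 = b := by omega
          omega
        rw [PySem.List.pyRange_one_eq_nil hmm]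
        have h0a : (0 : Int) ≤ max 0 a := le_max_left _ _
        have h0b : (0 : Int) ≤ max 0 (min b n) := le_max_left _ _
        rw [PySem.List.slice_toNat l h0a h0b]
        have : (max 0 (min b n)).toNat = 0 := by omega
        simp [this]
      · -- b > 0 : m1 = max a 0
        have hm1' : m1 = max 0 a := by omega
        rcases le_or_gt m2 m1 with hc | hc
        · -- empty middle; the slice is empty too
          rw [PySem.List.pyRange_one_eq_nil hc]
          rw [PySem.List.slice_toNat l (le_max_left _ _) (le_max_left _ _)]
          have : (max 0 (min b n)).toNat ≤ (max 0 a).toNat := by omega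
          simp [List.take_eq_nil_iff]
          omega
        · -- genuine middle: m1 = max 0 a, m2 = min b n, 0 ≤ m1 ≤ m2 ≤ n
          have hm2' : m2 = min b n := by omega
          have h0m1 : 0 ≤ m1 := by omega
          have hm2n : m2 ≤ n := by omega
          have hmax2 : max 0 (min b n) = m2 := by omega
          rw [hmax2, ← hm1']
          rw [PySem.List.slice_toNat l h0m1 (by omega)]
          have hk : m2.toNat = m1.toNat + (m2 - m1).toNat := by omega
          have hcast1 : m1 = ((m1.toNat : Int)) := by omega
          have hcast2 : m2 = ((m1.toNat : Int)) + (((m2 - m1).toNat : Int)) := by omega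
          rw [hcast1, hcast2, map_get_char_in_range l m1.toNat (m2 - m1).toNat (by omega)]
          congr 1
          omega
    rw [hpart1, hpart2, hpart3, segB]
    simp only [if_neg (not_le.mpr hba)]
    have e1 : (max 0 (min b 0 - a)).toNat = (m1 - a).toNat := by omega
    have e3 : (max 0 (b - max a n)).toNat = (b - m2).toNat := by
      rcases le_or_gt b n with hc | hc
      · have : min b n = b := by omega
        have : m2 = max a b := by omega
        omega
      · have : min b n = n := by omega
        omega
    rw [e1, e3]
    simp [List.append_assoc, hndef]

-- A's first loop = map over the shifted range [pos-s, pos)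
theorem loopA_left (l : List Char) (s pos : Int) :
    (PySem.List.pyRange 0 s 1).foldl (fun r i => r ++ [get_char l (pos - (s - i))]) []
      = (PySem.List.pyRange (pos - s) pos 1).map (get_char l) := by
  rw [PySem.List.foldl_append_singleton_eq_map, List.nil_append,
      PySem.List.pyRange_one, PySem.List.pyRange_one, List.map_map, List.map_map]
  have : (s - 0).toNat = (pos - (pos - s)).toNat := by omega
  rw [this]
  apply List.map_congr_left
  intro k _
  simp only [Function.comp]
  congr 1
  ring

-- A's second loop = append of the map over [pos+1, pos+s+1)
theorem loopA_right (l : List Char) (s pos : Int) (init : List Char) :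
    (PySem.List.pyRange 1 (s + 1) 1).foldl (fun r i => r ++ [get_char l (pos + i)]) init
      = init ++ (PySem.List.pyRange (pos + 1) (pos + s + 1) 1).map (get_char l) := by
  rw [PySem.List.foldl_append_singleton_eq_map,
      PySem.List.pyRange_one, PySem.List.pyRange_one, List.map_map, List.map_map]
  have : (s + 1 - 1).toNat = (pos + s + 1 - (pos + 1)).toNat := by omega
  rw [this]
  congr 1
  apply List.map_congr_left
  intro k _
  simp only [Function.comp]
  congr 1
  ring

-- ===== VERDICT (by name: the statement is the Claim_ definition above) =====
theorem cut_context_py_spec : Claim_equal_cut_context_py := by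
  intro s line pos _
  unfold Spec_cut_context_py cut_context_py cut_context_py_alt
  simp only []
  rw [loopA_left, loopA_right, segB_eq_map, segB_eq_map]
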